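-- pv_equiv track=rewrite | github.com/tcchenbtx/code_review_practice | MT_num.py | get_increment
-- ===== SOURCE A (Python) =====
-- def get_increment(shape):
--     """
--     Return the increments corresponding to each axis or dimension in the shape.
--
--     Parameters
--     ----------
--     shape : tuple
--         The shape of the input array.
--
--     Returns
--     -------
--     increment_per_axis : list
--         The number of positions in the linear order that you need to move
--         to retrieve the element specified by incrementing each axis
--         in the corresponding index.
--
--     Note
--     ----
--     You will need to understand row-major ordering to make sense of
--     this function.  You may want to reread the module docstring if
--     you are unsure of what to do.  Pay attention to the increment
--     along the linear array corresponding to incrementing the index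
--     for each axis.
--
--     You may also wish to use `reduce`, which has already been imported from
--     functools above.
--
--     Examples
--     --------
--     >>> get_increment((2, 4))
--     [4, 1]
--     >>> get_increment((2, 2, 2))
--     [4, 2, 1]
--     >>> get_increment((2, 4, 3))
--     [12, 3, 1]
--     """
--     length = len(shape)
--     increment_per_axis = [0] * length
--     product = 1
--     for i in range(length - 1, -1, -1):
--         if i == length - 1:
--             increment_per_axis[i] = 1
--         else:
--             increment_per_axis[i] = shape[i + 1] * product
--             product = product * shape[i + 1]
--     return increment_per_axis
-- ===== SOURCE B (Python) =====
-- from functools import reduce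
--
-- def get_increment(shape):
--     return [reduce(lambda a, b: a * b, shape[i + 1:], 1)
--             for i in range(len(shape))]
-- ===== Notes on version B (the rewrite author's own statement) =====
-- stated objective: idiomatic
-- what changed: B computes each stride directly as the product of the suffix shape[i+1:] in a comprehension, instead of A's backward in-place loop maintaining a running product.
import Mathlib
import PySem

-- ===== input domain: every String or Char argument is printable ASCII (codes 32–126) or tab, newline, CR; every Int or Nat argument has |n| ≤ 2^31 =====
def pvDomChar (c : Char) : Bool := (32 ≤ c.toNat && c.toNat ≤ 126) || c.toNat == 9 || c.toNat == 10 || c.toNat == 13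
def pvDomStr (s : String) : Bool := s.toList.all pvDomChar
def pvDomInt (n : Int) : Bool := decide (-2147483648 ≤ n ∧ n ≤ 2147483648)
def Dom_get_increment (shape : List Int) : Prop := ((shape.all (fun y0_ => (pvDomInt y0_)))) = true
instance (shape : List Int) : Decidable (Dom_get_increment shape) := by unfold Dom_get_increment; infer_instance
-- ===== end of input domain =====

-- B computes each stride directly as the suffix product shape[i+1:] (idiomatic comprehension) instead of A's backward loop with a running product.


-- ===== PORT A =====
-- the loop 'for i in range(length-1, -1, -1)' as a count-down recursion: counter m+1 means current i = m;
-- shape[i+1] is in range in the else branch, ported as getD (exact there)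
def get_increment_loop (shape : List Int) : Nat → List Int → Int → List Int
  | 0, inc, _ => inc
  | m + 1, inc, product =>
      if m = shape.length - 1 then
        get_increment_loop shape m (inc.set m 1) product
      else
        get_increment_loop shape m (inc.set m (shape.getD (m + 1) 0 * product))
          (product * shape.getD (m + 1) 0)

def get_increment (shape : List Int) : List Int :=
  let length := shape.length
  get_increment_loop shape length (List.replicate length 0) 1

-- ===== PORT B =====
-- shape[i+1:] for 0 ≤ i ported as List.drop (i+1) (exact for nonnegative start);
-- reduce(lambda a,b: a*b, xs, 1) is foldl (· * ·) 1
def get_increment_alt (shape : List Int) : List Int :=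
  (List.range shape.length).map (fun i => (shape.drop (i + 1)).foldl (· * ·) 1)

-- ===== PRECONDITION & SPEC =====
def Spec_get_increment (shape : List Int) (out : List Int) : Prop := out = get_increment_alt shape
instance (shape : List Int) (out : List Int) : Decidable (Spec_get_increment shape out) := by unfold Spec_get_increment; infer_instance

-- ===== CLAIM (what is proved, stated in full; the proofs are below) =====
def Claim_equal_get_increment : Prop := ∀ (shape : List Int), Dom_get_increment shape → Spec_get_increment shape (get_increment shape)

-- ===== LEMMAS AND PROOFS =====

theorem get_increment_loop_eq (shape : List Int) :
    ∀ (m : Nat) (inc : List Int) (_ : m ≤ shape.length) (hlen : inc.length = shape.length),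
    (∀ j (h : j < shape.length), m ≤ j → inc[j]'(hlen ▸ h) = (shape.drop (j + 1)).prod) →
    get_increment_loop shape m inc ((shape.drop (m + 1)).prod) = get_increment_alt shape := by
  intro m
  induction m with
  | zero =>
      intro inc _ hlen hset
      simp only [get_increment_loop, get_increment_alt]
      apply List.ext_getElem
      · simpa using hlen
      · intro j hj hj'
        simp only [List.getElem_map, List.getElem_range]
        rw [hset j (by simpa using hj') (Nat.zero_le _), List.prod_eq_foldl]
  | succ m ih =>
      intro inc hm hlen hset
      have hmlt : m < shape.length := by omega
      simp only [get_increment_loop]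
      by_cases hlast : m = shape.length - 1
      · rw [if_pos hlast]
        have hd1 : shape.drop (m + 1) = [] := List.drop_eq_nil_of_le (by omega)
        have hd2 : shape.drop (m + 1 + 1) = [] := List.drop_eq_nil_of_le (by omega)
        have := ih (inc.set m 1) (by omega) (by simpa using hlen) ?_
        · rw [hd2]; rw [hd1] at this; exact this
        · intro j hj hjm
          rcases eq_or_lt_of_le hjm with h | h
          · subst h
            rw [List.getElem_set_self (by simp [hlen]; omega), hd1, List.prod_nil]
          · rw [List.getElem_set_ne (by omega)]
            exact hset j hj (by omega)
      · rw [if_neg hlast]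
        have hsucc : m + 1 < shape.length := by omega
        have hgd : shape.getD (m + 1) 0 = shape[m + 1] := List.getD_eq_getElem _ _ hsucc
        have hdrop : shape.drop (m + 1) = shape[m + 1] :: shape.drop (m + 2) := by
          rw [List.drop_eq_getElem_cons hsucc]
        have hprod : (shape.drop (m + 1)).prod = shape[m + 1] * (shape.drop (m + 2)).prod := by
          rw [hdrop, List.prod_cons]
        have := ih (inc.set m (shape.getD (m + 1) 0 * (shape.drop (m + 2)).prod))
          (by omega) (by simpa using hlen) ?_
        · rw [show (shape.drop (m + 2)).prod * shape.getD (m + 1) 0 = (shape.drop (m + 1)).prod by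
            rw [hgd, hprod]; ring]
          exact this
        · intro j hj hjm
          rcases eq_or_lt_of_le hjm with h | h
          · subst h
            rw [List.getElem_set_self (by simp [hlen]; omega), hgd, hprod]
          · rw [List.getElem_set_ne (by omega)]
            exact hset j hj (by omega)

-- ===== VERDICT (by name: the statement is the Claim_ definition above) =====
theorem get_increment_spec : Claim_equal_get_increment := by
  intro shape _
  unfold Spec_get_increment get_increment
  have h := get_increment_loop_eq shape shape.length (List.replicate shape.length 0)
    le_rfl (by simp) (by intro j hj hjm; omega)
  rw [List.drop_eq_nil_of_le (by omega), List.prod_nil] at h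
  simpa using h
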